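-- pv_equiv track=rewrite | github.com/prasadathom/hackerrank | DSA Easy/greedy_priyankatoys.py | toys
-- ===== SOURCE A (Python) =====
-- def toys(w):
--     # Write your code here
--     w.sort()
--     j=1
--     min = w[0]+4
--
--     for i in range(0,len(w)):
--         if w[i]>min:
--             min = w[i]+4
--             j=j+1
--
--     return j
-- ===== SOURCE B (Python) =====
-- def toys(w):
--     # No sorting at all: repeatedly take the minimum remaining weight, open one
--     # container for its +4 window, and filter away everything the window covers.
--     # Unlike A, w is NOT mutated (A sorts it in place); return value is the same.
--     count = 0
--     rest = w
--     while rest: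
--         m = min(rest)
--         rest = [x for x in rest if x > m + 4]
--         count += 1
--     return count
-- ===== Notes on version B (the rewrite author's own statement) =====
-- stated objective: alternative
-- what changed: Drops the sort entirely: instead of A's sort + single threshold-tracking scan, B repeatedly extracts the minimum of the remaining multiset and filters out the whole min+4 window, one pass per container (O(n*k) staged filtering vs O(n log n) sort+scan).
-- crash fix: On the empty list A raises IndexError (it reads w[0] before looping); B's while-loop naturally returns 0. — e.g. on toys([]): A raises IndexError, B returns 0
import Mathlib
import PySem

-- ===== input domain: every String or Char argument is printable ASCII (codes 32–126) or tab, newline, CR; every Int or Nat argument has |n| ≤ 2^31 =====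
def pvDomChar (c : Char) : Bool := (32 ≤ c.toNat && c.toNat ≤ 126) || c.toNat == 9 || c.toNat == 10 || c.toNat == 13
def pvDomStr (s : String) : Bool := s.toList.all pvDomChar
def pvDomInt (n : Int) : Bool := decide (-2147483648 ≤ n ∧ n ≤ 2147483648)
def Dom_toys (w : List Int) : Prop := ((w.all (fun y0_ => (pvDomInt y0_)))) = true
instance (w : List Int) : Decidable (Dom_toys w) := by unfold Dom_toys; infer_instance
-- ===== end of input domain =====

-- B drops the sort entirely: it repeatedly takes the minimum of the remaining
-- weights and filters out the whole min+4 window, one pass per container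
-- (objective: alternative algorithm). A sorts w in place, B does not mutate w;
-- the equivalence proved here is about the RETURN value only.

-- ===== PORT A =====
-- A: sort, seed j=1 and min=w[0]+4 (IndexError on []), then scan all indices.
def toys (w : List Int) : Int :=
  let s := PySem.List.sorted w (fun x => x)
  match s with
  | [] => 0   -- Python raises IndexError here (w[0]); excluded by Pre_toys
  | h :: _ =>
    let st := (PySem.List.pyRange 0 (s.length : Int) 1).foldl
      (fun (st : Int × Int) i =>
        let wi := PySem.List.pyGetD s i 0
        if wi > st.2 then (st.1 + 1, wi + 4) else st)
      ((1 : Int), h + 4)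
    st.1

-- ===== PORT B =====
-- termination helper for the B port (cited by name in decreasing_by)
theorem toysB_filter_lt (x : Int) (xs : List Int) :
    ((x :: xs).filter (fun y => decide (xs.foldl min x + 4 < y))).length < (x :: xs).length := by
  apply List.length_filter_lt_length_iff_exists.mpr
  refine ⟨xs.foldl min x, PySem.List.min?_mem (PySem.List.min?_id_cons x xs), by simp⟩

-- B: while rest: m = min(rest); rest = [x for x in rest if x > m+4]; count += 1
-- (min(rest) on a nonempty list is the running-min fold, PySem.List.min?_id_cons)
def toysB : List Int → Int
  | [] => 0
  | x :: xs =>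
    let m := xs.foldl min x
    1 + toysB ((x :: xs).filter (fun y => decide (m + 4 < y)))
termination_by l => l.length
decreasing_by simp only [List.foldl_attach]; exact toysB_filter_lt x xs

def toys_alt (w : List Int) : Int := toysB w

-- ===== PRECONDITION & SPEC =====
-- Pre_ excludes exactly the empty list, on which A raises IndexError (w[0]).
def Pre_toys (w : List Int) : Prop := w ≠ []
instance (w : List Int) : Decidable (Pre_toys w) := by unfold Pre_toys; infer_instance
def pvWitness_toys : List Int := [1, 7, 2]

-- On the empty list A raises IndexError (it reads w[0] before looping); B returns 0.
def Raises_toys (w : List Int) : Prop := w = []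
instance (w : List Int) : Decidable (Raises_toys w) := by unfold Raises_toys; infer_instance
def pvRaiseWitness_toys : List Int := []
def pvRaiseWitnessOut_toys : Int := 0

def Spec_toys (w : List Int) (out : Int) : Prop := out = toys_alt w
instance (w : List Int) (out : Int) : Decidable (Spec_toys w out) := by unfold Spec_toys; infer_instance

-- ===== CLAIM (what is proved, stated in full; the proofs are below) =====
def Claim_equal_toys : Prop := ∀ (w : List Int), Dom_toys w → Pre_toys w → Spec_toys w (toys w)
def Claim_raises_toys : Prop := (∀ (w : List Int), Dom_toys w → Raises_toys w → ¬ Pre_toys w) ∧ (Dom_toys (pvRaiseWitness_toys) ∧ Raises_toys (pvRaiseWitness_toys) ∧ toys_alt (pvRaiseWitness_toys) = pvRaiseWitnessOut_toys)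

-- ===== LEMMAS AND PROOFS =====

-- characterisation of A's scan: window count with current threshold m
def cntW : Int → List Int → Int
  | _, [] => 0
  | m, x :: xs => if m < x then 1 + cntW (x + 4) xs else cntW m xs

theorem toysB_nil : toysB [] = 0 := by simp [toysB]

theorem toysB_cons (x : Int) (xs : List Int) :
    toysB (x :: xs) =
      1 + toysB ((x :: xs).filter (fun y => decide (xs.foldl min x + 4 < y))) := by
  simp [toysB]

-- the running-min fold of two permuted nonempty lists agree
theorem foldl_min_perm (x y : Int) (xs ys : List Int) (h : (x :: xs).Perm (y :: ys)) :
    xs.foldl min x = ys.foldl min y := by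
  have hm1 : (x :: xs).min? = some (xs.foldl min x) := rfl
  have hm2 : (y :: ys).min? = some (ys.foldl min y) := rfl
  have h1 : xs.foldl min x ∈ (y :: ys) := h.mem_iff.mp (List.min?_mem hm1)
  have h2 : ys.foldl min y ∈ (x :: xs) := h.symm.mem_iff.mp (List.min?_mem hm2)
  have le1 : ys.foldl min y ≤ xs.foldl min x :=
    PySem.List.min?_isMin (PySem.List.min?_id_cons y ys) _ h1
  have le2 : xs.foldl min x ≤ ys.foldl min y :=
    PySem.List.min?_isMin (PySem.List.min?_id_cons x xs) _ h2
  omega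

-- toysB depends only on the multiset of weights
theorem toysB_perm (n : Nat) : ∀ (l l' : List Int), l.length ≤ n → l.Perm l' →
    toysB l = toysB l' := by
  induction n with
  | zero =>
    intro l l' hn hp
    have : l = [] := List.eq_nil_of_length_eq_zero (Nat.le_zero.mp hn)
    subst this
    rw [hp.symm.eq_nil]
  | succ n ih =>
    intro l l' hn hp
    cases l with
    | nil => rw [hp.symm.eq_nil]
    | cons x xs =>
      cases l' with
      | nil => exact absurd hp.eq_nil (by simp)
      | cons y ys =>
        rw [toysB_cons, toysB_cons, foldl_min_perm x y xs ys hp]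
        congr 1
        apply ih
        · have h1 := toysB_filter_lt y ys
          have h2 : (y :: ys).length = (x :: xs).length := hp.length_eq.symm
          have h3 : ((x :: xs).filter (fun z => decide (ys.foldl min y + 4 < z))).length
              = ((y :: ys).filter (fun z => decide (ys.foldl min y + 4 < z))).length :=
            (hp.filter _).length_eq
          omega
        · exact hp.filter _

-- if x is ≤ every element of t, the running-min fold from x stays x
theorem foldl_min_of_le (x : Int) (t : List Int) (h : ∀ y ∈ t, x ≤ y) :
    t.foldl min x = x := by
  induction t with
  | nil => rfl
  | cons a t ih =>
    simp only [List.foldl_cons]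
    rw [min_eq_left (h a (by simp))]
    exact ih (fun y hy => h y (by simp [hy]))

-- on a sorted tail, A's threshold scan equals B's min+filter recursion
theorem cntW_eq_toysB (l : List Int) (hs : l.Pairwise (· ≤ ·)) (m : Int) :
    cntW m l = toysB (l.filter (fun y => decide (m < y))) := by
  induction l generalizing m with
  | nil => simp [toysB_nil, cntW]
  | cons x xs ih =>
    obtain ⟨hx, hxs⟩ := List.pairwise_cons.mp hs
    by_cases hm : m < x
    · rw [List.filter_cons_of_pos (by simpa using hm)]
      have hmin : (xs.filter (fun y => decide (m < y))).foldl min x = x :=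
        foldl_min_of_le x _ (fun y hy => hx y (List.mem_of_mem_filter hy))
      rw [toysB_cons, hmin, cntW, if_pos hm]
      congr 1
      rw [List.filter_cons_of_neg (by simp), List.filter_filter]
      rw [List.filter_congr (fun y _ => ?_), ih hxs (x + 4)]
      by_cases hy : x + 4 < y
      · have hmy : m < y := by omega
        simp [hy, hmy]
      · simp [hy]
    · rw [List.filter_cons_of_neg (by simpa using hm), cntW, if_neg hm, ih hxs m]

-- A's scan with threshold m, from any accumulator, counts the windows of cntW
theorem toys_fold_eq (l : List Int) (j m : Int) :
    (l.foldl (fun (st : Int × Int) wi =>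
        if wi > st.2 then (st.1 + 1, wi + 4) else st) (j, m)).1
      = j + cntW m l := by
  induction l generalizing j m with
  | nil => simp [cntW]
  | cons x xs ih =>
    simp only [List.foldl_cons]
    by_cases h : x > m
    · rw [if_pos h, ih, cntW, if_pos h]
      ring
    · rw [if_neg h, ih, cntW, if_neg h]

theorem toys_eq_alt (w : List Int) (hw : w ≠ []) : toys w = toys_alt w := by
  unfold toys toys_alt
  have hs : PySem.List.sorted w (fun x => x) ≠ [] := by
    intro hnil
    have hp : (PySem.List.sorted w (fun x : Int => x)).Perm w :=
      PySem.List.sorted_perm w (fun x => x) false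
    rw [hnil] at hp
    exact hw hp.symm.eq_nil
  obtain ⟨h, t, he⟩ := List.exists_cons_of_ne_nil hs
  have hp : (h :: t).Perm w := he ▸ PySem.List.sorted_perm w (fun x => x) false
  have hpw : (h :: t).Pairwise (· ≤ ·) := by
    have := PySem.List.sorted_pairwise w (fun x : Int => x)
    rw [he] at this
    exact this
  obtain ⟨hhd, htl⟩ := List.pairwise_cons.mp hpw
  simp only [he]
  rw [PySem.List.foldl_pyRange_zero_pyGetD' (h :: t) (0 : Int)
        (fun (st : Int × Int) (wi : Int) => if wi > st.2 then (st.1 + 1, wi + 4) else st)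
        (((1 : Int), h + 4) : Int × Int)]
  rw [List.foldl_cons, if_neg (by omega), toys_fold_eq]
  rw [toysB_perm w.length w (h :: t) le_rfl hp.symm, toysB_cons,
      foldl_min_of_le h t hhd, List.filter_cons_of_neg (by simp),
      cntW_eq_toysB t htl (h + 4)]

-- ===== VERDICT (by name: the statement is the Claim_ definition above) =====
theorem toys_spec : Claim_equal_toys := by
  intro w _ hpre
  exact toys_eq_alt w hpre

theorem toys_raises : Claim_raises_toys := by
  unfold Claim_raises_toys
  exact ⟨fun w _ hr hp => hp hr, by decide, by decide, by simp [toys_alt, pvRaiseWitness_toys, pvRaiseWitnessOut_toys, toysB_nil]⟩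

-- self-check: the crash-fix witness really lies in Raises_ and B's port returns the stated literal there
theorem pvRaiseWitness_toys_ok :
    Raises_toys pvRaiseWitness_toys ∧ toys_alt pvRaiseWitness_toys = pvRaiseWitnessOut_toys :=
  ⟨toys_raises.2.2.1, toys_raises.2.2.2⟩
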